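-- pv_equiv track=rewrite | github.com/Sunnywslau/checkTAF | main.py | get_filtered_airports
-- ===== SOURCE A (Python) =====
-- def get_filtered_airports(selected_region, region_data, airport_data):
--     """Get filtered airport data based on selected region"""
--     if selected_region == "ALL":
--         relevant_airports = set()
--         for airports in region_data.values():
--             relevant_airports.update(airports)
--     else:
--         relevant_airports = region_data[selected_region]
--
--     return {dest: alternates for dest, alternates in airport_data.items() if dest in relevant_airports}
-- ===== SOURCE B (Python) =====
-- def get_filtered_airports(selected_region, region_data, airport_data):
--     """Get filtered airport data based on selected region"""
--     if selected_region == "ALL":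
--         keep = lambda dest: any(dest in airports for airports in region_data.values())
--     else:
--         members = region_data[selected_region]
--         keep = lambda dest: dest in members
--     return {dest: alternates for dest, alternates in airport_data.items() if keep(dest)}
-- ===== Notes on version B (the rewrite author's own statement) =====
-- stated objective: alternative
-- what changed: B never materializes the union set of relevant airports: it filters the airport dict with an on-the-fly membership predicate (an any-scan over the region lists for ALL, direct list membership otherwise) instead of A's precomputed set.
import Mathlib
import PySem

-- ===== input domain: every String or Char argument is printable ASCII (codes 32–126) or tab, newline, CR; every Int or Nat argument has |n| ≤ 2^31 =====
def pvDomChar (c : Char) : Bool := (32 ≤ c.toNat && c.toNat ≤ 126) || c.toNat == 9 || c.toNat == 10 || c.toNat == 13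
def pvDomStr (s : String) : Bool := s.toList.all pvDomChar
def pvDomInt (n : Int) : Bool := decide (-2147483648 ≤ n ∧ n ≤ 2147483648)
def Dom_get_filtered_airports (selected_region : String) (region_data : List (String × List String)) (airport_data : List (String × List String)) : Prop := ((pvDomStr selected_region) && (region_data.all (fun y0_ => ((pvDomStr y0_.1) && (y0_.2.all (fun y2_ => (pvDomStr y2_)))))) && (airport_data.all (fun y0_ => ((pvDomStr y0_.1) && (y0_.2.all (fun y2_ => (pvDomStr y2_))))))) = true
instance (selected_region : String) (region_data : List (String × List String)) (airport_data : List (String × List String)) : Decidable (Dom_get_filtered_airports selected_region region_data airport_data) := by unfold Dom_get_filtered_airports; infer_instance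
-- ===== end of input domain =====

-- B filters the airport dict with an on-the-fly membership predicate instead of A's precomputed union set; same values, no speed claim.


-- ===== PORT A =====
-- A: build relevant_airports (a set, union of all region lists for "ALL", else region_data[selected_region]),
-- then the dict comprehension over airport_data.items() filtered by membership.
def get_filtered_airports (selected_region : String) (region_data : List (String × List String)) (airport_data : List (String × List String)) : List (String × List String) :=
  let rd : PySem.Dict String (List String) := PySem.Dict.ofList region_data
  let ad : PySem.Dict String (List String) := PySem.Dict.ofList airport_data
  if selected_region = "ALL" then
    let relevant : PySem.Set String :=
      rd.values.foldl (fun s airports => PySem.Set.update s airports) PySem.Set.empty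
    (ad.items.foldl (fun d p => if relevant.contains p.1 then d.insert p.1 p.2 else d)
      PySem.Dict.empty).items
  else
    match rd.get? selected_region with
    | none => []  -- KeyError in Python: excluded by Pre_
    | some relevant =>
      (ad.items.foldl (fun d p => if relevant.contains p.1 then d.insert p.1 p.2 else d)
        PySem.Dict.empty).items

-- ===== PORT B =====
-- B: a membership predicate `keep` (any-scan over the region lists for "ALL", list membership otherwise);
-- the same comprehension filtered by keep, no set built.
def get_filtered_airports_alt (selected_region : String) (region_data : List (String × List String)) (airport_data : List (String × List String)) : List (String × List String) :=
  let rd : PySem.Dict String (List String) := PySem.Dict.ofList region_data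
  let ad : PySem.Dict String (List String) := PySem.Dict.ofList airport_data
  let keep : String → Bool :=
    if selected_region = "ALL" then
      fun dest => rd.values.any (fun airports => airports.contains dest)
    else
      match rd.get? selected_region with
      | none => fun _ => false  -- KeyError in Python: excluded by Pre_
      | some members => fun dest => members.contains dest
  (ad.items.foldl (fun d p => if keep p.1 then d.insert p.1 p.2 else d) PySem.Dict.empty).items

-- ===== PRECONDITION & SPEC =====
-- Pre_ excludes only the inputs where Python raises KeyError: selected_region ≠ "ALL" and not a key of region_data.
def Pre_get_filtered_airports (selected_region : String) (region_data : List (String × List String)) (airport_data : List (String × List String)) : Prop :=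
  selected_region = "ALL" ∨ selected_region ∈ region_data.map (·.1)
instance (selected_region : String) (region_data : List (String × List String)) (airport_data : List (String × List String)) : Decidable (Pre_get_filtered_airports selected_region region_data airport_data) := by unfold Pre_get_filtered_airports; infer_instance

def pvWitness_get_filtered_airports : String × (List (String × List String)) × (List (String × List String)) :=
  ("EU", [("EU", ["LHR", "CDG"]), ("AS", ["HKG"])], [("LHR", ["LGW"]), ("HKG", ["MFM"]), ("JFK", ["EWR"])])

def Spec_get_filtered_airports (selected_region : String) (region_data : List (String × List String)) (airport_data : List (String × List String)) (out : List (String × List String)) : Prop := out = get_filtered_airports_alt selected_region region_data airport_data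
instance (selected_region : String) (region_data : List (String × List String)) (airport_data : List (String × List String)) (out : List (String × List String)) : Decidable (Spec_get_filtered_airports selected_region region_data airport_data out) := by unfold Spec_get_filtered_airports; infer_instance

-- ===== CLAIM (what is proved, stated in full; the proofs are below) =====
def Claim_equal_get_filtered_airports : Prop := ∀ (selected_region : String) (region_data : List (String × List String)) (airport_data : List (String × List String)), Dom_get_filtered_airports selected_region region_data airport_data → Pre_get_filtered_airports selected_region region_data airport_data → Spec_get_filtered_airports selected_region region_data airport_data (get_filtered_airports selected_region region_data airport_data)

-- ===== LEMMAS AND PROOFS =====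

-- membership in a fold of Set.add over one list
lemma mem_foldl_add (xs : List String) (s : PySem.Set String) (d : String) :
    d ∈ List.foldl PySem.Set.add s xs ↔ d ∈ s ∨ d ∈ xs := by
  induction xs generalizing s with
  | nil => simp
  | cons x t ih => simp [ih, PySem.Set.mem_add]; tauto

-- membership in the union set A accumulates over all region lists
lemma mem_foldl_update (vs : List (List String)) (s : PySem.Set String) (d : String) :
    d ∈ List.foldl (fun s airports => PySem.Set.update s airports) s vs ↔ d ∈ s ∨ ∃ a ∈ vs, d ∈ a := by
  induction vs generalizing s with
  | nil => simp
  | cons v t ih =>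
    rw [List.foldl_cons, ih]
    simp only [PySem.Set.update, mem_foldl_add, List.mem_cons]
    constructor
    · rintro ((h | h) | h)
      · exact Or.inl h
      · exact Or.inr ⟨v, Or.inl rfl, h⟩
      · obtain ⟨a, ha, hd⟩ := h; exact Or.inr ⟨a, Or.inr ha, hd⟩
    · rintro (h | ⟨a, (rfl | ha), hd⟩)
      · exact Or.inl (Or.inl h)
      · exact Or.inl (Or.inr hd)
      · exact Or.inr ⟨a, ha, hd⟩

-- A's set-membership test equals B's any-scan
lemma relevant_contains (vs : List (List String)) (d : String) :
    (List.foldl (fun s airports => PySem.Set.update s airports) PySem.Set.empty vs).contains d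
      = vs.any (fun airports => airports.contains d) := by
  rw [Bool.eq_iff_iff]
  simp [PySem.Set.contains, mem_foldl_update, PySem.Set.empty]

theorem get_filtered_airports_spec : Claim_equal_get_filtered_airports := by
  intro sr rd ad _ hpre
  unfold Spec_get_filtered_airports get_filtered_airports get_filtered_airports_alt
  by_cases hall : sr = "ALL"
  · simp only [hall, if_pos, relevant_contains]
  · simp only [if_neg hall]
    cases h : (PySem.Dict.ofList rd : PySem.Dict String (List String)).get? sr with
    | none =>
      -- Pre_ rules this out: selected_region is a key of region_data
      exfalso
      rcases hpre with h' | hmem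
      · exact hall h'
      rw [PySem.Dict.get?_eq_none_iff_not_mem_keys] at h
      apply h
      have hk : (PySem.Dict.ofList rd).keys = PySem.Set.update (PySem.Dict.empty : PySem.Dict String (List String)).keys (rd.map (·.1)) :=
        PySem.Dict.keys_foldl_insert_key rd (·.1) (fun _ p => p.2) PySem.Dict.empty
      rw [hk]
      simpa [PySem.Set.update, PySem.Dict.empty] using (mem_foldl_add (rd.map (·.1)) [] sr).2 (Or.inr hmem)
    | some members => simp
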